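-- pv_equiv track=rewrite | github.com/uf-focus-lab/HyperCam-UNet | util/args.py | load_list
-- ===== SOURCE A (Python) =====
-- def flatten(l: list[list]) -> list:
--     result = []
--     for item in l:
--         if isinstance(item, list):
--             result += flatten(item)
--         else:
--             result.append(item)
--     return result
--
-- def load_list(args: list[list[str]]):
--     if len(args) <= 0:
--         return None
--     at_dict = {}
--     for s in flatten(args):
--         s = s.split(":")
--         remap = None
--         if len(s) == 1:
--             """[RUN_ID]"""
--             key = ""
--             (val,) = s
--         elif len(s) == 2:
--             """[MODEL_NAME]:[RUN_ID]"""
--             key, val = s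
--         else:
--             """[MODEL_NAME]:[RUN_ID]:[REMAP]"""
--             assert len(s) == 3, ":".join(s)
--             key, val, remap = s
--         at_dict[key] = (val, remap)
--     return at_dict
-- ===== SOURCE B (Python) =====
-- def load_list(args: list[list[str]]):
--     if not args:
--         return None
--     out = {}
--     stack = list(args)[::-1]
--     while stack:
--         item = stack.pop()
--         if isinstance(item, list):
--             stack.extend(reversed(item))
--         else:
--             parts = item.split(":")
--             assert len(parts) <= 3, ":".join(parts)
--             key = parts[0] if len(parts) > 1 else ""
--             val = parts[0] if len(parts) == 1 else parts[1]
--             remap = parts[2] if len(parts) == 3 else None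
--             out[key] = (val, remap)
--     return out
-- ===== Notes on version B (the rewrite author's own statement) =====
-- stated objective: alternative
-- what changed: Replaces the recursive flatten-then-loop decomposition with a single iterative pass over an explicit work-list stack (popping items, pushing a list's elements back reversed) and computes key/val/remap by conditional selection from the split parts instead of branch-wise tuple unpacking.
import Mathlib
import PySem

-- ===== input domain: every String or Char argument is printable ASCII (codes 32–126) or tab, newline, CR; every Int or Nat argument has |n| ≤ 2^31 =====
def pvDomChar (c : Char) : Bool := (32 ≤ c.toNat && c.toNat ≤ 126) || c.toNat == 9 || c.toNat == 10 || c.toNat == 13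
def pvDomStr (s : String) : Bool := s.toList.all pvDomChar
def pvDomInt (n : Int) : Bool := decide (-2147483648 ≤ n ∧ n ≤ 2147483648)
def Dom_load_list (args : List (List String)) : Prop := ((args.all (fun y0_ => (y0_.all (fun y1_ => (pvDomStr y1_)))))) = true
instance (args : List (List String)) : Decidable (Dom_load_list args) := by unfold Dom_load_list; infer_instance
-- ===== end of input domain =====

-- B replaces A's recursive flatten + separate dict loop by one iterative work-list pass with
-- conditional field selection (objective: alternative decomposition, same cost).

-- ===== PORT A =====
-- s.split(":") — exact: Python split on a nonempty separator is PySem.Chars.splitOn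
def pvSplitColon (s : String) : List String :=
  (PySem.Chars.splitOn s.toList [':']).map String.ofList

-- inner level of flatten: items are strings, so each is appended
def pvFlatInner (l : List String) : List String :=
  l.foldl (fun r s => r ++ [s]) []

-- outer level of flatten: items are lists, so result += flatten(item)
def pvFlatten (l : List (List String)) : List String :=
  l.foldl (fun r item => r ++ pvFlatInner item) []

-- one iteration of A's dict loop; the final branch carries "assert len(s) == 3":
-- a split of length > 3 raises AssertionError in Python and is excluded by Pre_ (the port
-- simply reads the first three fields there).
def pvStepA (d : PySem.Dict String (String × Option String)) (s : String) :
    PySem.Dict String (String × Option String) :=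
  let ps := pvSplitColon s
  if ps.length = 1 then d.insert "" (ps.getD 0 "", none)
  else if ps.length = 2 then d.insert (ps.getD 0 "") (ps.getD 1 "", none)
  else d.insert (ps.getD 0 "") (ps.getD 1 "", some (ps.getD 2 ""))

def load_list (args : List (List String)) : Option (List (String × String × Option String)) :=
  if args.length ≤ 0 then none
  else some (((pvFlatten args).foldl pvStepA PySem.Dict.empty).items)

-- ===== PORT B =====
-- one iteration of B's loop body on a string item: conditional selection of key/val/remap
-- (the "assert len(parts) <= 3" region is outside Pre_; the port reads the fields as written).
def pvStepB (d : PySem.Dict String (String × Option String)) (s : String) :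
    PySem.Dict String (String × Option String) :=
  let parts := pvSplitColon s
  let key := if parts.length > 1 then parts.getD 0 "" else ""
  let val := if parts.length = 1 then parts.getD 0 "" else parts.getD 1 ""
  let remap := if parts.length = 3 then some (parts.getD 2 "") else none
  d.insert key (val, remap)

-- B's work-list: head of this list = top of the Python stack (stack = list(args)[::-1], pop()
-- takes from the end, extend(reversed(item)) pushes item's elements so they pop left-to-right).
def pvLoopB : List (List String ⊕ String) → PySem.Dict String (String × Option String) →
    PySem.Dict String (String × Option String)
  | [], d => d
  | Sum.inl item :: rest, d => pvLoopB (item.map Sum.inr ++ rest) d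
  | Sum.inr s :: rest, d => pvLoopB rest (pvStepB d s)
termination_by stack _ => (stack.map (fun x => match x with | Sum.inl l => l.length + 1 | Sum.inr _ => 1)).sum
decreasing_by
  · simp [Function.comp_def]
  · simp

def load_list_alt (args : List (List String)) : Option (List (String × String × Option String)) :=
  if args = [] then none
  else some ((pvLoopB (args.map Sum.inl) PySem.Dict.empty).items)

-- ===== PRECONDITION & SPEC =====
-- Pre_ excludes exactly the inputs containing a string with three or more ':' characters,
-- on which Python A (and B) raise AssertionError instead of returning.
def Pre_load_list (args : List (List String)) : Prop :=
  ∀ l ∈ args, ∀ s ∈ l, s.toList.count ':' ≤ 2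
instance (args : List (List String)) : Decidable (Pre_load_list args) := by
  unfold Pre_load_list; infer_instance

def pvWitness_load_list : List (List String) := [["m:r"], ["x", "a:b:c"], []]

def Spec_load_list (args : List (List String)) (out : Option (List (String × String × Option String))) : Prop := out = load_list_alt args
instance (args : List (List String)) (out : Option (List (String × String × Option String))) : Decidable (Spec_load_list args out) := by unfold Spec_load_list; infer_instance

-- ===== CLAIM (what is proved, stated in full; the proofs are below) =====
def Claim_equal_load_list : Prop := ∀ (args : List (List String)), Dom_load_list args → Pre_load_list args → Spec_load_list args (load_list args)

-- ===== LEMMAS AND PROOFS =====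

-- splitting on a single ':' yields exactly (count ':') + 1 fields
theorem pvSplitOn_go_length (fuel : Nat) :
    ∀ (l cur : List Char) (acc : List (List Char)), l.length ≤ fuel →
      (PySem.Chars.splitOn.go [':'] fuel l cur acc).length = acc.length + 1 + l.count ':' := by
  induction fuel with
  | zero =>
    intro l cur acc h
    have : l = [] := List.length_eq_zero_iff.mp (Nat.le_zero.mp h)
    subst this; simp [PySem.Chars.splitOn.go]
  | succ n ih =>
    intro l cur acc h
    cases l with
    | nil => simp [PySem.Chars.splitOn.go]
    | cons c cs =>
      simp only [PySem.Chars.splitOn.go]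
      by_cases hc : c = ':'
      · subst hc
        have hp : [':'].isPrefixOf (':' :: cs) = true := by
          simp [List.isPrefixOf]
        rw [if_pos hp]
        have := ih (List.drop 1 (':' :: cs)) [] (cur.reverse :: acc) (by simp at h ⊢; omega)
        simp at this ⊢
        omega
      · have hp : [':'].isPrefixOf (c :: cs) = false := by
          simp [List.isPrefixOf]
          exact fun hcc => (hc hcc.symm).elim
        rw [if_neg (by simp [hp])]
        have := ih cs (c :: cur) acc (by simp at h ⊢; omega)
        simp [hc] at this ⊢
        omega

theorem pvSplitColon_length (s : String) :
    (pvSplitColon s).length = s.toList.count ':' + 1 := by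
  unfold pvSplitColon PySem.Chars.splitOn
  rw [List.length_map, pvSplitOn_go_length (s.toList.length + 1) s.toList [] [] (by omega)]
  simp
  omega

-- step agreement on the admitted strings
theorem pvStep_eq (d : PySem.Dict String (String × Option String)) (s : String)
    (h : s.toList.count ':' ≤ 2) : pvStepA d s = pvStepB d s := by
  unfold pvStepA pvStepB
  have hlen := pvSplitColon_length s
  have h13 : (pvSplitColon s).length = 1 ∨ (pvSplitColon s).length = 2 ∨
      (pvSplitColon s).length = 3 := by omega
  rcases h13 with h1 | h2 | h3
  · simp [h1]
  · simp [h2]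
  · simp [h3]

-- A's flatten is List.flatten
theorem pvFlatInner_eq (l : List String) : pvFlatInner l = l := by
  unfold pvFlatInner
  induction l using List.reverseRecOn with
  | nil => rfl
  | append_singleton xs x ih => simp [List.foldl_append, ih]

theorem pvFlatten_aux (l : List (List String)) :
    ∀ init, l.foldl (fun r item => r ++ pvFlatInner item) init = init ++ l.flatten := by
  induction l with
  | nil => simp
  | cons x xs ih =>
    intro init
    rw [List.foldl_cons, ih, pvFlatInner_eq, List.flatten_cons, List.append_assoc]

theorem pvFlatten_eq (l : List (List String)) : pvFlatten l = l.flatten := by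
  unfold pvFlatten
  rw [pvFlatten_aux l []]
  simp

-- B's work-list processes a block of pushed strings as a fold
theorem pvLoopB_inr (l : List String) :
    ∀ (rest : List (List String ⊕ String)) d,
      pvLoopB (l.map Sum.inr ++ rest) d = pvLoopB rest (l.foldl pvStepB d) := by
  induction l with
  | nil => intro rest d; simp
  | cons s ss ih => intro rest d; simp only [List.map_cons, List.cons_append, pvLoopB, ih,
      List.foldl_cons]

-- and hence the whole work-list run is the fold over the flattened input
theorem pvLoopB_inl (ls : List (List String)) :
    ∀ d, pvLoopB (ls.map Sum.inl) d = ls.flatten.foldl pvStepB d := by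
  induction ls with
  | nil => intro d; simp [pvLoopB]
  | cons x xs ih =>
    intro d
    simp only [List.map_cons, pvLoopB]
    rw [pvLoopB_inr, ih, List.flatten_cons, List.foldl_append]

theorem pvFold_eq (l : List String) (h : ∀ s ∈ l, s.toList.count ':' ≤ 2) :
    ∀ d, l.foldl pvStepA d = l.foldl pvStepB d := by
  induction l with
  | nil => intro d; rfl
  | cons s ss ih =>
    intro d
    simp only [List.foldl_cons]
    rw [pvStep_eq d s (h s (by simp))]
    exact ih (fun t ht => h t (by simp [ht])) _

-- ===== VERDICT (by name: the statement is the Claim_ definition above) =====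
theorem load_list_spec : Claim_equal_load_list := by
  intro args _hDom hPre
  unfold Spec_load_list load_list load_list_alt
  by_cases hnil : args = []
  · subst hnil; rfl
  · rw [if_neg (by simpa using hnil), if_neg hnil]
    congr 1
    rw [pvFlatten_eq, pvLoopB_inl]
    apply congrArg
    apply pvFold_eq
    intro s hs
    obtain ⟨l, hl, hsl⟩ := List.mem_flatten.mp hs
    exact hPre l hl s hsl
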